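-- pv_equiv track=rewrite | github.com/shuo-git/Cali-Ana | misc.py | restore_punc
-- ===== SOURCE A (Python) =====
-- def restore_punc(s):
--     chars = list(s.strip())
--     outputs = []
--     open_flag = True
--
--     for i in range(len(chars)):
--         c = chars[i]
--
--         #if len(outputs) > 1 and ord(outputs[-1]) < 128:
--         #    if i < len(chars) - 1 and ord(chars[i+1]) < 128:
--         #        outputs.append(c)
--         #        continue
--
--         if c == "!":
--             outputs.append("！")
--         elif c == "(":
--             outputs.append("（")
--         elif c == ")":
--             outputs.append("）")
--         elif c == "\"":
--             if open_flag:
--                 open_flag = False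
--                 outputs.append("“")
--             else:
--                 open_flag = True
--                 outputs.append("”")
--         elif c == ",":
--             outputs.append("，")
--         elif c == ".":
--             outputs.append("。")
--         elif c == ":":
--             outputs.append("：")
--         elif c == ";":
--             outputs.append("；")
--         elif c == "?":
--             outputs.append("？")
--         elif c == "[":
--             outputs.append("［")
--         elif c == "]":
--             outputs.append("］")
--         elif c == "~":
--             outputs.append("～")
--         else:
--             outputs.append(c)
--
--     return "".join(outputs)
-- ===== SOURCE B (Python) =====
-- _TABLE = str.maketrans("!(),.:;?[]~", "！（），。：；？［］～")
--
-- def restore_punc(s):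
--     parts = s.strip().translate(_TABLE).split('"')
--     out = [parts[0]]
--     for i, p in enumerate(parts[1:]):
--         out.append('“' if i % 2 == 0 else '”')
--         out.append(p)
--     return ''.join(out)
-- ===== Notes on version B (the rewrite author's own statement) =====
-- stated objective: faster
-- what changed: A's per-character if/elif loop with a quote-toggle flag is replaced by a translation table applied via str.translate plus a split on the double-quote character rejoined with alternating fullwidth quote marks; no per-character Python loop or toggle state remains.
import Mathlib
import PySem

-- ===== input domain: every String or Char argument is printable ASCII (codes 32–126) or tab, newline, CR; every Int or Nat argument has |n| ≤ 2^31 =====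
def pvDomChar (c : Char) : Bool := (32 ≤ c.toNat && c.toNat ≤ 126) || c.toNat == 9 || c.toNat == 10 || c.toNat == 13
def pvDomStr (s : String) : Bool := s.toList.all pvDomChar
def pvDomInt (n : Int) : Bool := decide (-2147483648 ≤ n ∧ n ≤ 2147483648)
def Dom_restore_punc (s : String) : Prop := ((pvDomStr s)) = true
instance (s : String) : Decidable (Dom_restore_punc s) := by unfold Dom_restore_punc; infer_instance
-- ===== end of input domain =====

-- B replaces A's per-character loop with quote-toggle state by a translation table applied
-- in one pass plus a split-on-quote / rejoin with alternating quote marks (measured faster at the check's sizes).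

-- ===== PORT A =====
-- A's loop body: the if/elif chain in A's order, state = (outputs, open_flag)
def pvStepA (st : List Char × Bool) (c : Char) : List Char × Bool :=
  if c = '!' then (st.1 ++ ['！'], st.2)
  else if c = '(' then (st.1 ++ ['（'], st.2)
  else if c = ')' then (st.1 ++ ['）'], st.2)
  else if c = '"' then
    (if st.2 then (st.1 ++ ['“'], false) else (st.1 ++ ['”'], true))
  else if c = ',' then (st.1 ++ ['，'], st.2)
  else if c = '.' then (st.1 ++ ['。'], st.2)
  else if c = ':' then (st.1 ++ ['：'], st.2)
  else if c = ';' then (st.1 ++ ['；'], st.2)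
  else if c = '?' then (st.1 ++ ['？'], st.2)
  else if c = '[' then (st.1 ++ ['［'], st.2)
  else if c = ']' then (st.1 ++ ['］'], st.2)
  else if c = '~' then (st.1 ++ ['～'], st.2)
  else (st.1 ++ [c], st.2)

def restore_punc (s : String) : String :=
  String.ofList (((PySem.Str.strip s).toList.foldl pvStepA ([], true)).1)

-- ===== PORT B =====
-- the translation table (str.maketrans / str.translate): '"' is not in the table
def pvTr (c : Char) : Char :=
  if c = '!' then '！' else if c = '(' then '（' else if c = ')' then '）'
  else if c = ',' then '，' else if c = '.' then '。' else if c = ':' then '：'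
  else if c = ';' then '；' else if c = '?' then '？' else if c = '[' then '［'
  else if c = ']' then '］' else if c = '~' then '～' else c

-- Source B's rejoin loop: for i, p in enumerate(parts[1:]): quote mark by parity, then p
def pvGlue : Nat → List (List Char) → List Char
  | _, [] => []
  | i, p :: ps => (if i % 2 = 0 then '“' else '”') :: (p ++ pvGlue (i + 1) ps)

def restore_punc_alt (s : String) : String :=
  let parts := PySem.Chars.splitOn ((PySem.Str.strip s).toList.map pvTr) ['"']
  match parts with
  | [] => ""
  | p :: ps => String.ofList (p ++ pvGlue 0 ps)

-- ===== PRECONDITION & SPEC =====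
def Spec_restore_punc (s : String) (out : String) : Prop := out = restore_punc_alt s
instance (s : String) (out : String) : Decidable (Spec_restore_punc s out) := by unfold Spec_restore_punc; infer_instance

-- ===== CLAIM (what is proved, stated in full; the proofs are below) =====
def Claim_equal_restore_punc : Prop := ∀ (s : String), Dom_restore_punc s → Spec_restore_punc s (restore_punc s)

-- ===== LEMMAS AND PROOFS =====

-- single-'"' split, head/tail form (proof-side characterisation of splitOn)
def pvSplit1 : List Char → List Char × List (List Char)
  | [] => ([], [])
  | c :: cs =>
    if c = '"' then ([], (pvSplit1 cs).1 :: (pvSplit1 cs).2)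
    else (c :: (pvSplit1 cs).1, (pvSplit1 cs).2)

lemma pvSplitOn_go_eq : ∀ (l : List Char) (fuel : Nat) (cur : List Char) (acc : List (List Char)),
    l.length < fuel →
    PySem.Chars.splitOn.go ['"'] fuel l cur acc
      = acc.reverse ++ (cur.reverse ++ (pvSplit1 l).1) :: (pvSplit1 l).2 := by
  intro l
  induction l with
  | nil =>
    intro fuel cur acc h
    cases fuel with
    | zero => omega
    | succ k => simp [PySem.Chars.splitOn.go, pvSplit1]
  | cons c rest ih =>
    intro fuel cur acc h
    cases fuel with
    | zero => simp at h
    | succ k =>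
      have hk : rest.length < k := by simpa using h
      by_cases hc : c = '"'
      · subst hc
        rw [show PySem.Chars.splitOn.go ['"'] (k+1) ('"' :: rest) cur acc
              = PySem.Chars.splitOn.go ['"'] k rest [] (cur.reverse :: acc) by
            simp [PySem.Chars.splitOn.go, List.isPrefixOf]]
        rw [ih k [] (cur.reverse :: acc) hk]
        simp [pvSplit1]
      · rw [show PySem.Chars.splitOn.go ['"'] (k+1) (c :: rest) cur acc
              = PySem.Chars.splitOn.go ['"'] k rest (c :: cur) acc by
            simp [PySem.Chars.splitOn.go, List.isPrefixOf, Ne.symm hc]]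
        rw [ih k (c :: cur) acc hk]
        simp [pvSplit1, hc]

lemma pvSplitOn_eq (l : List Char) :
    PySem.Chars.splitOn l ['"'] = (pvSplit1 l).1 :: (pvSplit1 l).2 := by
  have := pvSplitOn_go_eq l (l.length + 1) [] [] (by omega)
  simpa [PySem.Chars.splitOn] using this

-- flag-state form of the rejoin
def pvGlueF : Bool → List (List Char) → List Char
  | _, [] => []
  | flag, p :: ps => (if flag then '“' else '”') :: (p ++ pvGlueF (!flag) ps)

lemma pvGlue_eq_glueF : ∀ (ps : List (List Char)) (i : Nat),
    pvGlue i ps = pvGlueF (decide (i % 2 = 0)) ps := by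
  intro ps
  induction ps with
  | nil => intro i; rfl
  | cons p ps ih =>
    intro i
    have hpar : decide ((i + 1) % 2 = 0) = !decide (i % 2 = 0) := by
      rcases Nat.mod_two_eq_zero_or_one i with h | h <;> simp [Nat.add_mod, h]
    rcases Nat.mod_two_eq_zero_or_one i with h | h <;>
      simp [pvGlue, pvGlueF, ih, hpar, h]

lemma pvTr_quote : pvTr '"' = '"' := by decide

lemma pvTr_ne_quote {c : Char} (h : c ≠ '"') : pvTr c ≠ '"' := by
  by_cases h1 : c = '!'; · subst h1; decide
  by_cases h2 : c = '('; · subst h2; decide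
  by_cases h3 : c = ')'; · subst h3; decide
  by_cases h4 : c = ','; · subst h4; decide
  by_cases h5 : c = '.'; · subst h5; decide
  by_cases h6 : c = ':'; · subst h6; decide
  by_cases h7 : c = ';'; · subst h7; decide
  by_cases h8 : c = '?'; · subst h8; decide
  by_cases h9 : c = '['; · subst h9; decide
  by_cases h10 : c = ']'; · subst h10; decide
  by_cases h11 : c = '~'; · subst h11; decide
  simpa only [pvTr, if_neg h1, if_neg h2, if_neg h3, if_neg h4, if_neg h5,
    if_neg h6, if_neg h7, if_neg h8, if_neg h9, if_neg h10, if_neg h11] using h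

lemma pvStepA_ne_quote (st : List Char × Bool) {c : Char} (h : c ≠ '"') :
    pvStepA st c = (st.1 ++ [pvTr c], st.2) := by
  by_cases h1 : c = '!'; · subst h1; rfl
  by_cases h2 : c = '('; · subst h2; rfl
  by_cases h3 : c = ')'; · subst h3; rfl
  by_cases h4 : c = ','; · subst h4; rfl
  by_cases h5 : c = '.'; · subst h5; rfl
  by_cases h6 : c = ':'; · subst h6; rfl
  by_cases h7 : c = ';'; · subst h7; rfl
  by_cases h8 : c = '?'; · subst h8; rfl
  by_cases h9 : c = '['; · subst h9; rfl
  by_cases h10 : c = ']'; · subst h10; rfl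
  by_cases h11 : c = '~'; · subst h11; rfl
  simp only [pvStepA, pvTr, if_neg h1, if_neg h2, if_neg h3, if_neg h4, if_neg h5,
    if_neg h6, if_neg h7, if_neg h8, if_neg h9, if_neg h10, if_neg h11, if_neg h]

lemma pvFoldA_eq : ∀ (cs : List Char) (acc : List Char) (flag : Bool),
    (cs.foldl pvStepA (acc, flag)).1
      = acc ++ (pvSplit1 (cs.map pvTr)).1 ++ pvGlueF flag (pvSplit1 (cs.map pvTr)).2 := by
  intro cs
  induction cs with
  | nil => intro acc flag; simp [pvSplit1, pvGlueF]
  | cons c cs ih =>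
    intro acc flag
    by_cases hc : c = '"'
    · subst hc
      have hstep : pvStepA (acc, flag) '"'
          = (acc ++ [if flag then '“' else '”'], !flag) := by
        cases flag <;> rfl
      rw [List.foldl_cons, hstep, ih]
      simp [pvTr_quote, pvSplit1, pvGlueF]
    · rw [List.foldl_cons, pvStepA_ne_quote _ hc, ih]
      simp [pvSplit1, pvTr_ne_quote hc]

-- ===== VERDICT (by name: the statement is the Claim_ definition above) =====
theorem restore_punc_spec : Claim_equal_restore_punc := by
  intro s _
  unfold Spec_restore_punc restore_punc restore_punc_alt
  rw [pvSplitOn_eq, pvFoldA_eq]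
  simp [pvGlue_eq_glueF]
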